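-- pv_equiv track=rewrite | github.com/Anay241/raycast-audio-transcriber | app/core/text_processor.py | process_text
-- ===== SOURCE A (Python) =====
-- def process_text(text: str) -> str:
--     """Process transcribed text to improve formatting with proper capitalization and punctuation."""
--     if not text:
--         return text
--
--     sentences = []
--     current_sentence = []
--
--     # Split by spaces to process word by word
--     words = text.split()
--
--     for word in words:
--         current_sentence.append(word)
--
--         # Check if this word ends with a sentence-ending punctuation
--         if word.endswith(('.', '!', '?')):
--             # Join the current sentence and add to sentences list
--             sentences.append(' '.join(current_sentence))
--             current_sentence = []
--
--     # Add any remaining words as a sentence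
--     if current_sentence:
--         sentences.append(' '.join(current_sentence))
--
--     # Process each sentence for capitalization
--     processed_sentences = []
--     for sentence in sentences:
--         if sentence:
--             # Capitalize the first letter of each sentence
--             processed_sentence = sentence[0].upper() + sentence[1:] if len(sentence) > 1 else sentence.upper()
--             processed_sentences.append(processed_sentence)
--
--     # Join all processed sentences with spaces
--     return ' '.join(processed_sentences)
-- ===== SOURCE B (Python) =====
-- def process_text(text: str) -> str:
--     result = []
--     capitalize = True
--     for word in text.split():
--         result.append(word[0].upper() + word[1:] if capitalize else word)
--         capitalize = word.endswith(('.', '!', '?'))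
--     return ' '.join(result)
-- ===== Notes on version B (the rewrite author's own statement) =====
-- stated objective: simpler
-- what changed: Replaces A's two-pass sentence-grouping (build a list of joined sentences, then re-capitalize each sentence's first character) with a single pass over the words carrying a boolean flag that marks sentence starts, so no intermediate sentence strings are built.
import Mathlib
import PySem

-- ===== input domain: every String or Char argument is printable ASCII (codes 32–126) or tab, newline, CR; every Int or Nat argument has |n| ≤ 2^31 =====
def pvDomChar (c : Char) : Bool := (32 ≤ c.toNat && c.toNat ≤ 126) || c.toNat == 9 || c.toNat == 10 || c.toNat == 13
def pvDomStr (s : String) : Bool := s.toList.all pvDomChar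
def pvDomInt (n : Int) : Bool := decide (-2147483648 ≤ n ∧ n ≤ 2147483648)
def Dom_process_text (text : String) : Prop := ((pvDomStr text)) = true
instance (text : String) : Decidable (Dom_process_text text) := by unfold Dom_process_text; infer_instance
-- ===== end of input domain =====

-- B replaces A's two-pass sentence-grouping with a single pass over the words carrying a
-- boolean flag that marks sentence starts (objective: simpler).

-- ===== PORT A =====
-- word.endswith(('.', '!', '?'))  (shared by both Pythons verbatim)
def pvEndsSent (w : List Char) : Bool :=
  PySem.Chars.endswith w ['.'] || PySem.Chars.endswith w ['!'] || PySem.Chars.endswith w ['?']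

-- the body of A's first loop: append word to current_sentence; on sentence end, join and flush
def pvStepA (st : List (List Char) × List (List Char)) (w : List Char) :
    List (List Char) × List (List Char) :=
  let cur := st.2 ++ [w]
  if pvEndsSent w then (st.1 ++ [PySem.Chars.join [' '] cur], []) else (st.1, cur)

-- sentence[0].upper() + sentence[1:] if len(sentence) > 1 else sentence.upper()
-- (sentence[0] ported as take 1: exact, the guard `if sentence` ensures nonemptiness)
def pvCapSentence (s : List Char) : List Char :=
  if 1 < s.length then PySem.Chars.upper (s.take 1) ++ s.drop 1 else PySem.Chars.upper s

def process_text (text : String) : String :=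
  if text = "" then text
  else
    let words := PySem.Chars.split₀ text.toList
    let st := words.foldl pvStepA ([], [])
    let sentences := if st.2 = [] then st.1 else st.1 ++ [PySem.Chars.join [' '] st.2]
    let processed := sentences.foldl
      (fun acc s => if s = [] then acc else acc ++ [pvCapSentence s]) []
    String.ofList (PySem.Chars.join [' '] processed)

-- ===== PORT B =====
-- word[0].upper() + word[1:]  (word[0] ported as take 1: exact, split() words are nonempty)
def pvCapWord (w : List Char) : List Char :=
  PySem.Chars.upper (w.take 1) ++ w.drop 1

-- B's loop body: emit the word (capitalized when the flag is set), update the flag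
def pvStepB (st : List (List Char) × Bool) (w : List Char) : List (List Char) × Bool :=
  (st.1 ++ [if st.2 then pvCapWord w else w], pvEndsSent w)

def process_text_alt (text : String) : String :=
  let st := (PySem.Chars.split₀ text.toList).foldl pvStepB ([], true)
  String.ofList (PySem.Chars.join [' '] st.1)

-- ===== PRECONDITION & SPEC =====
def Spec_process_text (text : String) (out : String) : Prop := out = process_text_alt text
instance (text : String) (out : String) : Decidable (Spec_process_text text out) := by unfold Spec_process_text; infer_instance

-- ===== CLAIM (what is proved, stated in full; the proofs are below) =====
def Claim_equal_process_text : Prop := ∀ (text : String), Dom_process_text text → Spec_process_text text (process_text text)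

-- ===== LEMMAS AND PROOFS =====

-- completed sentences (as word lists) produced by A's grouping loop from partial sentence cur
def pvG : List (List Char) → List (List Char) → List (List (List Char))
  | _, [] => []
  | cur, w :: ws => if pvEndsSent w then (cur ++ [w]) :: pvG [] ws else pvG (cur ++ [w]) ws

-- the leftover partial sentence after A's grouping loop
def pvH : List (List Char) → List (List Char) → List (List Char)
  | cur, [] => cur
  | cur, w :: ws => if pvEndsSent w then pvH [] ws else pvH (cur ++ [w]) ws

-- all sentences of A (completed ones plus the nonempty leftover)
def pvS (cur ws : List (List Char)) : List (List (List Char)) :=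
  pvG cur ws ++ (if pvH cur ws = [] then [] else [pvH cur ws])

-- capitalizing the first word of a sentence (what B does at a sentence start)
def pvCapHead : List (List Char) → List (List Char)
  | [] => []
  | w :: rest => pvCapWord w :: rest

-- the word stream B emits, as a function of the initial flag
def pvF : Bool → List (List Char) → List (List Char)
  | _, [] => []
  | flag, w :: ws => (if flag then pvCapWord w else w) :: pvF (pvEndsSent w) ws

theorem pvS_nil (cur : List (List Char)) :
    pvS cur [] = if cur = [] then [] else [cur] := by
  by_cases h : cur = [] <;> simp [pvS, pvG, pvH, h]

theorem pvS_cons (cur : List (List Char)) (w : List Char) (ws : List (List Char)) :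
    pvS cur ([w] ++ ws)
      = if pvEndsSent w then (cur ++ [w]) :: pvS [] ws else pvS (cur ++ [w]) ws := by
  by_cases h : pvEndsSent w = true <;> simp [pvS, pvG, pvH, h]

theorem pvB_fold (ws : List (List Char)) : ∀ res flag,
    (List.foldl pvStepB (res, flag) ws).1 = res ++ pvF flag ws := by
  induction ws with
  | nil => intro res flag; simp [pvF]
  | cons w ws ih => intro res flag; simp [pvStepB, pvF, ih]

theorem pvA_fold (ws : List (List Char)) : ∀ sent cur,
    List.foldl pvStepA (sent, cur) ws
      = (sent ++ (pvG cur ws).map (PySem.Chars.join [' ']), pvH cur ws) := by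
  induction ws with
  | nil => intro sent cur; simp [pvG, pvH]
  | cons w ws ih =>
    intro sent cur
    by_cases h : pvEndsSent w = true
    · simp [pvStepA, h, pvG, pvH, ih]
    · simp [pvStepA, h, pvG, pvH, ih]

theorem pvProc_fold (l : List (List Char)) : ∀ acc, (∀ s ∈ l, s ≠ []) →
    List.foldl (fun acc s => if s = [] then acc else acc ++ [pvCapSentence s]) acc l
      = acc ++ l.map pvCapSentence := by
  induction l with
  | nil => intro acc _; simp
  | cons s l ih =>
    intro acc h
    have hs : s ≠ [] := h s (by simp)
    simp [hs, ih _ (fun t ht => h t (by simp [ht]))]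

theorem pvSplit₀_go_ne_nil : ∀ (s cur : List Char) (acc : List (List Char)),
    (∀ w ∈ acc, w ≠ []) → ∀ w ∈ PySem.Chars.split₀.go s cur acc, w ≠ [] := by
  intro s
  induction s with
  | nil =>
    intro cur acc hacc w hw
    by_cases hc : cur.isEmpty = true
    · simp [PySem.Chars.split₀.go, hc] at hw
      exact hacc w hw
    · have hcne : cur ≠ [] := by simpa [List.isEmpty_iff] using hc
      have hw' : w = cur.reverse ∨ w ∈ acc := by
        simp [PySem.Chars.split₀.go, hc] at hw
        tauto
      rcases hw' with rfl | h
      · simpa [List.reverse_eq_nil_iff] using hcne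
      · exact hacc w h
  | cons c rest ih =>
    intro cur acc hacc w hw
    by_cases hsp : PySem.Chars.isspace c = true
    · by_cases hc : cur.isEmpty = true
      · simp only [PySem.Chars.split₀.go, hsp, hc, if_true] at hw
        exact ih [] acc hacc w hw
      · simp only [PySem.Chars.split₀.go, hsp, hc, if_true, Bool.false_eq_true, if_false] at hw
        refine ih [] (cur.reverse :: acc) ?_ w hw
        intro v hv
        rcases List.mem_cons.mp hv with h | h
        · subst h; simpa [List.reverse_eq_nil_iff, List.isEmpty_iff] using hc
        · exact hacc v h
    · simp only [PySem.Chars.split₀.go, hsp, Bool.false_eq_true, if_false] at hw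
      exact ih (c :: cur) acc hacc w hw

theorem pvSplit₀_ne_nil (cs : List Char) : ∀ w ∈ PySem.Chars.split₀ cs, w ≠ [] :=
  pvSplit₀_go_ne_nil cs [] [] (by simp)

theorem pvS_words (ws : List (List Char)) : ∀ cur,
    (∀ w ∈ cur, w ≠ []) → (∀ w ∈ ws, w ≠ []) →
    ∀ s ∈ pvS cur ws, s ≠ [] ∧ ∀ w ∈ s, w ≠ [] := by
  induction ws with
  | nil =>
    intro cur hcur _ s hs
    by_cases h : cur = []
    · subst h; simp [pvS_nil] at hs
    · rw [pvS_nil] at hs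
      simp [h] at hs
      subst hs; exact ⟨h, hcur⟩
  | cons w ws ih =>
    intro cur hcur hws s hs
    have hw : w ≠ [] := hws w (by simp)
    have hws' : ∀ v ∈ ws, v ≠ [] := fun v hv => hws v (by simp [hv])
    have hcur' : ∀ v ∈ cur ++ [w], v ≠ [] := by
      intro v hv
      rcases List.mem_append.mp hv with h2 | h2
      · exact hcur v h2
      · simp at h2; subst h2; exact hw
    rw [show w :: ws = [w] ++ ws from rfl, pvS_cons] at hs
    by_cases h : pvEndsSent w = true
    · rw [if_pos h] at hs
      rcases List.mem_cons.mp hs with h1 | h1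
      · subst h1; exact ⟨by simp, hcur'⟩
      · exact ih [] (by simp) hws' s h1
    · rw [if_neg h] at hs
      exact ih (cur ++ [w]) hcur' hws' s hs

theorem pvJoin_cons (sep x : List Char) (xs : List (List Char)) :
    PySem.Chars.join sep (x :: xs)
      = x ++ (if xs = [] then [] else sep ++ PySem.Chars.join sep xs) := by
  cases xs with
  | nil => simp [PySem.Chars.join, List.intercalate]
  | cons y ys => simp [PySem.Chars.join, List.intercalate, List.intersperse]

theorem pvJoin_ne_nil (s : List (List Char)) (h : s ≠ []) (hw : ∀ w ∈ s, w ≠ []) :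
    PySem.Chars.join [' '] s ≠ [] := by
  cases s with
  | nil => exact absurd rfl h
  | cons w rest =>
    have hw0 : w ≠ [] := hw w (by simp)
    rw [pvJoin_cons]
    simp [hw0]

theorem pvCap_join (s : List (List Char)) (h : s ≠ []) (hw : ∀ w ∈ s, w ≠ []) :
    pvCapSentence (PySem.Chars.join [' '] s) = PySem.Chars.join [' '] (pvCapHead s) := by
  cases s with
  | nil => exact absurd rfl h
  | cons w rest =>
    obtain ⟨c, w', rfl⟩ : ∃ c w', w = c :: w' := by
      cases w with
      | nil => exact absurd rfl (hw _ (by simp))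
      | cons c w' => exact ⟨c, w', rfl⟩
    rw [pvJoin_cons, pvCapHead.eq_def]
    simp only []
    rw [pvJoin_cons]
    by_cases hr : rest = []
    · subst hr
      cases w' with
      | nil => simp [pvCapSentence, pvCapWord, PySem.Chars.upper]
      | cons d w'' => simp [pvCapSentence, pvCapWord, PySem.Chars.upper]
    · simp only [hr, if_false]
      simp [pvCapSentence, pvCapWord, PySem.Chars.upper]

theorem pvJoin_append (sep : List Char) (xs ys : List (List Char))
    (hx : xs ≠ []) (hy : ys ≠ []) :
    PySem.Chars.join sep (xs ++ ys)
      = PySem.Chars.join sep xs ++ sep ++ PySem.Chars.join sep ys := by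
  induction xs with
  | nil => exact absurd rfl hx
  | cons x xs ih =>
    cases xs with
    | nil => rw [List.singleton_append, pvJoin_cons, pvJoin_cons]; simp [hy]
    | cons x2 xs' =>
      have hne : (x2 :: xs') ++ ys ≠ [] := by simp
      rw [List.cons_append, pvJoin_cons, if_neg hne, ih (by simp)]
      conv_rhs => rw [pvJoin_cons]
      simp [List.append_assoc]

theorem pvJoin_map_join (L : List (List (List Char))) (h : ∀ s ∈ L, s ≠ []) :
    PySem.Chars.join [' '] (L.map (PySem.Chars.join [' ']))
      = PySem.Chars.join [' '] L.flatten := by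
  induction L with
  | nil => simp
  | cons s L ih =>
    have hs : s ≠ [] := h s (by simp)
    have ih' := ih (fun t ht => h t (by simp [ht]))
    cases L with
    | nil => simp [PySem.Chars.join, List.intercalate]
    | cons t L' =>
      have ht : t ≠ [] := h t (by simp)
      have hfl : (t :: L').flatten ≠ [] := by
        cases t with
        | nil => exact absurd rfl ht
        | cons a t' => simp
      rw [List.map_cons, pvJoin_cons, if_neg (by simp), ih',
          show (s :: t :: L').flatten = s ++ (t :: L').flatten from rfl,
          pvJoin_append [' '] s (t :: L').flatten hs hfl]
      simp [List.flatten_cons, List.append_assoc]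

theorem pvMain (ws : List (List Char)) : ∀ cur,
    ((pvS cur ws).map pvCapHead).flatten
      = if cur = [] then pvF true ws else pvCapHead cur ++ pvF false ws := by
  induction ws with
  | nil =>
    intro cur
    by_cases h : cur = [] <;> simp [pvS_nil, h, pvF]
  | cons w ws ih =>
    intro cur
    rw [show w :: ws = [w] ++ ws from rfl, pvS_cons]
    by_cases h : pvEndsSent w = true
    · rw [if_pos h]
      cases cur with
      | nil => simp [pvF, h, pvCapHead, ih]
      | cons c0 r => simp [pvF, h, pvCapHead, ih]
    · rw [if_neg h]
      have h' : pvEndsSent w = false := by simpa using h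
      cases cur with
      | nil => simp [pvF, h', pvCapHead, ih]
      | cons c0 r => simp [pvF, h', pvCapHead, ih]

-- ===== VERDICT (by name: the statement is the Claim_ definition above) =====
theorem process_text_spec : Claim_equal_process_text := by
  intro text _
  unfold Spec_process_text
  by_cases h0 : text = ""
  · subst h0; decide
  · simp only [process_text, process_text_alt, h0, if_false]
    set ws := PySem.Chars.split₀ text.toList with hws
    have hwords : ∀ w ∈ ws, w ≠ [] := pvSplit₀_ne_nil text.toList
    have hSw : ∀ s ∈ pvS [] ws, s ≠ [] ∧ ∀ w ∈ s, w ≠ [] :=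
      pvS_words ws [] (by simp) hwords
    rw [pvA_fold, pvB_fold]
    have hsent :
        (if pvH [] ws = [] then (pvG [] ws).map (PySem.Chars.join [' '])
         else (pvG [] ws).map (PySem.Chars.join [' ']) ++ [PySem.Chars.join [' '] (pvH [] ws)])
          = (pvS [] ws).map (PySem.Chars.join [' ']) := by
      by_cases hh : pvH [] ws = [] <;> simp [pvS, hh]
    simp only [List.nil_append, hsent]
    rw [pvProc_fold _ _ (by
      intro s hsm
      rcases List.mem_map.mp hsm with ⟨t, htm, rfl⟩
      exact pvJoin_ne_nil t (hSw t htm).1 (hSw t htm).2)]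
    rw [List.nil_append]
    congr 1
    have hmap : List.map pvCapSentence (List.map (PySem.Chars.join [' ']) (pvS [] ws))
        = List.map (PySem.Chars.join [' ']) (List.map pvCapHead (pvS [] ws)) := by
      simp only [List.map_map]
      refine List.map_congr_left (fun t ht => ?_)
      simp only [Function.comp_apply]
      exact pvCap_join t (hSw t ht).1 (hSw t ht).2
    rw [hmap]
    rw [pvJoin_map_join _ (by
      intro s hsm
      rcases List.mem_map.mp hsm with ⟨t, htm, rfl⟩
      have := (hSw t htm).1
      cases t with
      | nil => exact absurd rfl this
      | cons a t' => simp [pvCapHead])]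
    rw [pvMain ws []]
    simp
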